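-- pv_equiv track=rewrite | github.com/Chad-Appleye/first_streamlit_test | codx_biotools_master/oligotools.py | trim_template
-- ===== SOURCE A (Python) =====
-- def trim_template(sequence, length=120):
--     """ Trim a sequence positive control template to a specified size from the middle to keep binding regions on both ends
--     Parameters:
--         sequence (str) -- the sequence to trim
--         length (int, optional) -- the final length of the sequence to return (Default 120)
--     Return:
--         sequence (str) -- trimmed sequence with bases removed from the middle until it reaches the specified length
--     """
--     try:
--         length = int(length)
--     except:
--         raise Exception('The length must be an integer')
--
--     seq_length = len(sequence)
--
--     if seq_length <= length:
--         raise Exception('the sequence length is already {}'.format(seq_length))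
--
--     sequence = list(sequence)
--     while len(sequence) > length:
--         sequence.pop(len(sequence)//2)
--
--     return ''.join(sequence)
-- ===== SOURCE B (Python) =====
-- def trim_template(sequence, length=120):
--     """Trim by one slice: alternately popping the middle element keeps the
--     first ceil(length/2) and last floor(length/2) characters, so compute
--     the kept prefix/suffix directly instead of popping in a loop."""
--     try:
--         length = int(length)
--     except Exception:
--         raise Exception('The length must be an integer')
--
--     seq_length = len(sequence)
--
--     if seq_length <= length:
--         raise Exception('the sequence length is already {}'.format(seq_length))
--
--     head = (length + 1) // 2
--     return sequence[:head] + sequence[seq_length - (length - head):]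
-- ===== Notes on version B (the rewrite author's own statement) =====
-- stated objective: faster
-- what changed: Replace the loop that pops the middle character one at a time (each pop shifting the tail) by a closed form: the survivors are exactly the first ceil(length/2) and last floor(length/2) characters, taken with two slices.
import Mathlib
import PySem

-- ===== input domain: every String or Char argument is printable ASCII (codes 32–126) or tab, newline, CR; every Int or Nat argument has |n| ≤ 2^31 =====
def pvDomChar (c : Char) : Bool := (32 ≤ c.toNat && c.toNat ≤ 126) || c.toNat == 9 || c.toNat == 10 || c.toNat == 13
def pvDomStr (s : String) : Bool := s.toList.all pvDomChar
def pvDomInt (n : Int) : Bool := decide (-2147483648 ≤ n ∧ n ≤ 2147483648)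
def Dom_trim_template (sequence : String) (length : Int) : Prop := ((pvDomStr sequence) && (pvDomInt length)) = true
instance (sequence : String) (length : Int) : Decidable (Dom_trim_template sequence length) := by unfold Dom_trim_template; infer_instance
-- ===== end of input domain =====

-- B replaces A's quadratic pop-the-middle loop with one prefix+suffix slice (proved equal on Pre_).


-- ===== PORT A =====
-- 'while len(sequence) > length: sequence.pop(len(sequence)//2)'
-- (pop? = none is Python's IndexError, reachable only for length < 0, outside Pre_)
def trimLoop (cs : List Char) (length : Int) : List Char :=
  if h : length < (cs.length : Int) then
    match hp : PySem.List.pop? cs (PySem.Int.floordiv (cs.length : Int) 2) with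
    | some (_, rest) => trimLoop rest length
    | none => []
  else cs
termination_by cs.length
decreasing_by
  have := PySem.List.length_of_pop?_eq_some _ hp; simp at this; omega

def trim_template (sequence : String) (length : Int) : String :=
  if (sequence.toList.length : Int) ≤ length then ""   -- Python raises here, outside Pre_
  else String.ofList (trimLoop sequence.toList length)

-- ===== PORT B =====
def trim_template_alt (sequence : String) (length : Int) : String :=
  let cs := sequence.toList
  if (cs.length : Int) ≤ length then ""   -- Python raises here, outside Pre_
  else
    let head := PySem.Int.floordiv (length + 1) 2
    String.ofList (PySem.List.slice cs none (some head) ++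
               PySem.List.slice cs (some ((cs.length : Int) - (length - head))) none)

-- ===== PRECONDITION & SPEC =====
-- A raises an explicit Exception when len(sequence) <= length, and an IndexError
-- (pop from empty list) when length < 0: Pre_ excludes exactly those inputs.
def Pre_trim_template (sequence : String) (length : Int) : Prop :=
  0 ≤ length ∧ length < (sequence.toList.length : Int)
instance (sequence : String) (length : Int) : Decidable (Pre_trim_template sequence length) := by
  unfold Pre_trim_template; infer_instance

def pvWitness_trim_template : String × Int := ("ACGTACGT", 5)

def Spec_trim_template (sequence : String) (length : Int) (out : String) : Prop := out = trim_template_alt sequence length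
instance (sequence : String) (length : Int) (out : String) : Decidable (Spec_trim_template sequence length out) := by unfold Spec_trim_template; infer_instance

-- ===== CLAIM (what is proved, stated in full; the proofs are below) =====
def Claim_equal_trim_template : Prop := ∀ (sequence : String) (length : Int), Dom_trim_template sequence length → Pre_trim_template sequence length → Spec_trim_template sequence length (trim_template sequence length)

-- ===== LEMMAS AND PROOFS =====

-- The loop invariant: popping the middle repeatedly keeps the first ⌈L/2⌉ and last ⌊L/2⌋ elements.
theorem trimLoop_closed :
    ∀ (n : Nat) (cs : List Char), cs.length = n → ∀ (L : Nat), L < n →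
      trimLoop cs (L : Int) = cs.take ((L + 1) / 2) ++ cs.drop (cs.length - L / 2) := by
  intro n
  induction n using Nat.strong_induction_on with
  | _ n ih =>
    intro cs hlen L hL
    rw [trimLoop.eq_def]
    have hcond : (L : Int) < (cs.length : Int) := by rw [hlen]; exact_mod_cast hL
    rw [dif_pos hcond]
    have hdiv : PySem.Int.floordiv (cs.length : Int) 2 = ((cs.length / 2 : Nat) : Int) := by
      exact_mod_cast PySem.Int.floordiv_natCast cs.length 2
    have hidx : cs.length / 2 < cs.length := by omega
    have hpop : PySem.List.pop? cs (PySem.Int.floordiv (cs.length : Int) 2)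
        = some (cs[cs.length / 2], cs.eraseIdx (cs.length / 2)) := by
      rw [hdiv]; exact PySem.List.pop?_natCast cs _ hidx
    rw [hpop]
    show trimLoop (cs.eraseIdx (cs.length / 2)) (L : Int)
        = cs.take ((L + 1) / 2) ++ cs.drop (cs.length - L / 2)
    have herase : cs.eraseIdx (cs.length / 2)
        = cs.take (cs.length / 2) ++ cs.drop (cs.length / 2 + 1) :=
      List.eraseIdx_eq_take_drop_succ ..
    have hrestlen : (cs.eraseIdx (cs.length / 2)).length = n - 1 := by
      rw [List.length_eraseIdx_of_lt hidx, hlen]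
    by_cases hmore : L < n - 1
    · -- recurse
      rw [ih (n - 1) (by omega) _ hrestlen L hmore, herase]
      have hta : (List.take (cs.length / 2) cs).length = cs.length / 2 := by
        simp [Nat.min_eq_left (Nat.le_of_lt hidx)]
      rw [List.take_append, List.drop_append, List.length_append, hta, List.length_drop]
      have e1 : (L + 1) / 2 - cs.length / 2 = 0 := by omega
      have hd : List.drop (cs.length / 2 + (cs.length - (cs.length / 2 + 1)) - L / 2)
          (List.take (cs.length / 2) cs) = [] :=
        List.drop_eq_nil_of_le (by rw [hta]; omega)
      rw [e1, List.take_zero, List.append_nil, hd, List.nil_append,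
          List.take_take, Nat.min_eq_left (by omega : (L + 1) / 2 ≤ cs.length / 2),
          List.drop_drop]
      congr 2
      omega
    · -- the recursive call's guard is false: rest has exactly L elements
      have hstop : n - 1 = L := by omega
      rw [trimLoop.eq_def, dif_neg (by rw [hrestlen, hstop]; omega)]
      rw [herase]
      congr 1
      · congr 1; omega
      · congr 1; omega

theorem trim_template_spec : Claim_equal_trim_template := by
  intro sequence length _ hPre
  obtain ⟨h0, hlt⟩ := hPre
  unfold Spec_trim_template trim_template trim_template_alt
  set cs := sequence.toList with hcs
  rw [if_neg (by omega), if_neg (by omega)]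
  obtain ⟨L, rfl⟩ : ∃ L : Nat, length = (L : Nat) := ⟨length.toNat, (Int.toNat_of_nonneg h0).symm⟩
  have hLn : L < cs.length := by exact_mod_cast hlt
  have hhead : PySem.Int.floordiv ((L : Int) + 1) 2 = (((L + 1) / 2 : Nat) : Int) := by
    exact_mod_cast PySem.Int.floordiv_natCast (L + 1) 2
  rw [trimLoop_closed cs.length cs rfl L hLn]
  congr 1
  rw [hhead]
  have hfl : (L : Int) - (((L + 1) / 2 : Nat) : Int) = ((L / 2 : Nat) : Int) := by
    have : (L + 1) / 2 + L / 2 = L := by omega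
    push_cast; omega
  rw [hfl]
  have hs1 : PySem.List.slice cs none (some (((L + 1) / 2 : Nat) : Int))
      = cs.take ((L + 1) / 2) := by
    rw [PySem.List.slice_to cs (by positivity)]; simp; omega
  have hs2 : PySem.List.slice cs (some ((cs.length : Int) - ((L / 2 : Nat) : Int))) none
      = cs.drop (cs.length - L / 2) := by
    rw [PySem.List.slice_from cs (by omega : (0:Int) ≤ (cs.length : Int) - ((L / 2 : Nat) : Int))]
    have ht : ((cs.length : Int) - ((L / 2 : Nat) : Int)).toNat = cs.length - L / 2 := by omega
    rw [ht]
  rw [hs1, hs2]
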